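-- pv_equiv track=rewrite | github.com/xiaotai-yang/tai_surf | ED/ladder_tool.py | ABC_periodic
-- ===== SOURCE A (Python) =====
-- def ABC_periodic(L):
--     B = {}
--     A = {}
--     C = {}
--     for i in range (int(L/2)):
--         A[i] = [2*i, 2*i+1]
--         C[i] = [2*i+L, 2*i+1+L]
--
--     for i in A:
--         if i!=0:
--             A[i]+=A[i-1]
--             C[i]+=C[i-1]
--             A[i].sort()
--             C[i].sort()
--         B[i] = list(set(range(L))-set(A[i])-set(C[i]))
--     return A, B, C
-- ===== SOURCE B (Python) =====
-- def ABC_periodic(L):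
--     # Direct construction: each A-entry and C-entry is a contiguous range; each
--     # B-entry is the same set as A's double set-difference, built in one step.
--     n = int(L / 2)
--     A = {i: list(range(2 * i + 2)) for i in range(n)}
--     B = {i: list(set(range(2 * i + 2, L))) for i in range(n)}
--     C = {i: list(range(L, L + 2 * i + 2)) for i in range(n)}
--     return A, B, C
-- ===== Notes on version B (the rewrite author's own statement) =====
-- stated objective: alternative
-- what changed: Replaces the cumulative list-concatenate-and-sort loop and the double set-difference by directly constructing each dict entry as a contiguous integer range (and the one set build that fixes B's ordering), in three dict comprehensions.
import Mathlib
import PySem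

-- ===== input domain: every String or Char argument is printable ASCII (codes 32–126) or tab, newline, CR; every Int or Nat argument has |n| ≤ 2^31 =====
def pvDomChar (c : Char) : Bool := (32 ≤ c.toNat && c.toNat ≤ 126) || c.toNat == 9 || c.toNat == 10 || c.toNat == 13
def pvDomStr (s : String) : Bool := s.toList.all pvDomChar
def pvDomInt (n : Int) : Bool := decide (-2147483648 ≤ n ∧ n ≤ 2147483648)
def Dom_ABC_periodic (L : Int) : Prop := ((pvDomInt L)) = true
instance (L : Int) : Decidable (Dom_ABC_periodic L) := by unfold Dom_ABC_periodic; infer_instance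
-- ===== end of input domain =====

-- B replaces A's cumulative concatenate-and-sort loop and double set-difference by a direct
-- construction of each dict entry as a contiguous range (objective: alternative).
-- Both programs return `list(set(...))`; its order is CPython's small-int hash-table iteration
-- order, which the shared helpers below model exactly for the consecutive nonnegative runs
-- arising here (hash(v) = v, final table position v mod table-size, collision-free).

-- ===== PORT A =====
abbrev pvD := PySem.Dict Int (List Int)

-- smallest power of two > minused, starting from 8 (CPython set_table_resize); fuel 64 suffices for |L| ≤ 2^31
def pvPow2Go : Nat → Nat → Nat → Nat
  | 0, cur, _ => cur
  | f+1, cur, minused => if cur ≤ minused then pvPow2Go f (2*cur) minused else cur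

-- CPython set table size after inserting m distinct-hash elements one by one:
-- resize triggers at the first k with 5*k ≥ 3*(size-1), to the smallest power of two > 4*k (2*k beyond 50000)
def pvSetSizeGo : Nat → Nat → Nat → Nat
  | 0, size, _ => size
  | f+1, size, m =>
    let t := (3*(size-1)+4)/5
    if m < t then size
    else pvSetSizeGo f (pvPow2Go 64 8 (if t ≤ 50000 then 4*t else 2*t)) m

def pvSetSize (m : Nat) : Nat := pvSetSizeGo 64 8 m

-- list(s) for a CPython set s of nonnegative small ints forming a consecutive run:
-- iteration order = ascending table slot v mod size (exact here: slots are collision-free)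
def pvSetToList (s : List Int) : List Int :=
  PySem.List.sorted s (fun v => v % ((pvSetSize s.length : Nat) : Int))

-- the body of A's second loop ('for i in A: …'), one iteration
def pvStepA (L : Int) (st : pvD × pvD × pvD) (i : Int) : pvD × pvD × pvD :=
  let A := st.1
  let B := st.2.1
  let C := st.2.2
  let AC :=
    if i ≠ 0 then
      let A := A.insert i (A.getD i [] ++ A.getD (i-1) [])                -- A[i] += A[i-1]  (keys always present)
      let C := C.insert i (C.getD i [] ++ C.getD (i-1) [])                -- C[i] += C[i-1]
      let A := A.insert i (PySem.List.sorted (A.getD i []) (fun x => x))  -- A[i].sort()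
      let C := C.insert i (PySem.List.sorted (C.getD i []) (fun x => x))  -- C[i].sort()
      (A, C)
    else (A, C)
  let A := AC.1
  let C := AC.2
  -- B[i] = list(set(range(L)) - set(A[i]) - set(C[i])); list(·) via the exact order model pvSetToList
  let B := B.insert i (pvSetToList (PySem.Set.diff (PySem.Set.diff
              (PySem.Set.ofList (PySem.List.pyRange 0 L))
              (PySem.Set.ofList (A.getD i [])))
              (PySem.Set.ofList (C.getD i []))))
  (A, B, C)

def ABC_periodic (L : Int) : (List (Int × List Int)) × (List (Int × List Int)) × (List (Int × List Int)) :=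
  let n := PySem.Int.truncdiv L 2          -- int(L/2)
  let AC := (PySem.List.pyRange 0 n).foldl
    (fun (ac : pvD × pvD) i => (ac.1.insert i [2*i, 2*i+1], ac.2.insert i [2*i+L, 2*i+1+L]))
    (PySem.Dict.empty, PySem.Dict.empty)
  let st := (AC.1.keys).foldl (pvStepA L) (AC.1, PySem.Dict.empty, AC.2)
  (st.1.items, st.2.1.items, st.2.2.items)

-- ===== PORT B =====
-- list(set(range(a, b))) for 0 ≤ a, via the same exact CPython order model
def pvListSetRange (a b : Int) : List Int :=
  pvSetToList (PySem.Set.ofList (PySem.List.pyRange a b))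

def ABC_periodic_alt (L : Int) : (List (Int × List Int)) × (List (Int × List Int)) × (List (Int × List Int)) :=
  let n := PySem.Int.truncdiv L 2          -- int(L/2)
  ((PySem.List.pyRange 0 n).map (fun i => (i, PySem.List.pyRange 0 (2*i+2))),
   (PySem.List.pyRange 0 n).map (fun i => (i, pvListSetRange (2*i+2) L)),
   (PySem.List.pyRange 0 n).map (fun i => (i, PySem.List.pyRange L (L+2*i+2))))

-- ===== PRECONDITION & SPEC =====
def Spec_ABC_periodic (L : Int) (out : (List (Int × List Int)) × (List (Int × List Int)) × (List (Int × List Int))) : Prop := out = ABC_periodic_alt L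
instance (L : Int) (out : (List (Int × List Int)) × (List (Int × List Int)) × (List (Int × List Int))) : Decidable (Spec_ABC_periodic L out) := by unfold Spec_ABC_periodic; infer_instance

-- ===== CLAIM (what is proved, stated in full; the proofs are below) =====
def Claim_equal_ABC_periodic : Prop := ∀ (L : Int), Dom_ABC_periodic L → Spec_ABC_periodic L (ABC_periodic L)

-- ===== LEMMAS AND PROOFS =====

-- dict states of A's second loop after the first j keys, as literal assoc lists
def pvMkA (n j : Int) : pvD :=
  PySem.Dict.mk ((PySem.List.pyRange 0 n).map
    (fun i => (i, if i < j then PySem.List.pyRange 0 (2*i+2) else [2*i, 2*i+1])))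

def pvMkC (L n j : Int) : pvD :=
  PySem.Dict.mk ((PySem.List.pyRange 0 n).map
    (fun i => (i, if i < j then PySem.List.pyRange L (L+2*i+2) else [2*i+L, 2*i+1+L])))

def pvMkB (L j : Int) : pvD :=
  PySem.Dict.mk ((PySem.List.pyRange 0 j).map (fun i => (i, pvListSetRange (2*i+2) L)))

lemma pvKeys_mk_map (n : Int) (f : Int → List Int) :
    (PySem.Dict.mk ((PySem.List.pyRange 0 n).map (fun i => (i, f i)))).keys
      = PySem.List.pyRange 0 n := by
  simp [PySem.Dict.keys, List.map_map, Function.comp_def]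

lemma pvNodup_keys (n : Int) (f : Int → List Int) :
    (PySem.Dict.mk ((PySem.List.pyRange 0 n).map (fun i => (i, f i)))).keys.Nodup := by
  rw [pvKeys_mk_map]; exact PySem.List.nodup_pyRange_one 0 n

lemma pvGetD_mk (n : Int) (f : Int → List Int) {j : Int} (h0 : 0 ≤ j) (hj : j < n) (d : List Int) :
    (PySem.Dict.mk ((PySem.List.pyRange 0 n).map (fun i => (i, f i)))).getD j d = f j := by
  apply PySem.Dict.getD_of_mem_items
  · exact List.mem_map.mpr ⟨j, by rw [PySem.List.mem_pyRange_one]; exact ⟨h0, hj⟩, rfl⟩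
  · exact pvNodup_keys n f

lemma pvContains_mk (n : Int) (f : Int → List Int) (j : Int) :
    (PySem.Dict.mk ((PySem.List.pyRange 0 n).map (fun i => (i, f i)))).contains j
      = decide (0 ≤ j ∧ j < n) := by
  rw [PySem.Dict.contains_eq_decide_mem_keys, pvKeys_mk_map]
  simp [PySem.List.mem_pyRange_one]

lemma pvInsert_mk (n : Int) (f : Int → List Int) {j : Int} (h0 : 0 ≤ j) (hj : j < n) (v : List Int) :
    (PySem.Dict.mk ((PySem.List.pyRange 0 n).map (fun i => (i, f i)))).insert j v
      = PySem.Dict.mk ((PySem.List.pyRange 0 n).map (fun i => (i, if i = j then v else f i))) := by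
  apply PySem.Dict.ext
  rw [PySem.Dict.items_insert_of_contains _ _ (by rw [pvContains_mk]; simp; omega)]
  show List.map _ (List.map _ _) = _
  rw [List.map_map]
  apply List.map_congr_left
  intro i _
  by_cases h : i = j
  · subst h; simp
  · simp [h]

lemma pvInsert_fresh (j : Int) (h0 : 0 ≤ j) (g : Int → List Int) (v : List Int) :
    (PySem.Dict.mk ((PySem.List.pyRange 0 j).map (fun i => (i, g i)))).insert j v
      = PySem.Dict.mk ((PySem.List.pyRange 0 (j+1)).map
          (fun i => (i, if i = j then v else g i))) := by
  apply PySem.Dict.ext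
  rw [PySem.Dict.items_insert_of_not_contains _ _ (by rw [pvContains_mk]; simp)]
  show List.map _ _ ++ _ = List.map _ _
  rw [PySem.List.pyRange_one_succ_right h0, List.map_append]
  congr 1
  · apply List.map_congr_left
    intro i hi
    rw [PySem.List.mem_pyRange_one] at hi
    have hij : i ≠ j := by omega
    simp [hij]
  · simp

-- sorted([b, b+1] + list(range(a, b))) = list(range(a, b+2))
lemma pvSorted_step (a b : Int) (hab : a ≤ b) :
    PySem.List.sorted ([b, b+1] ++ PySem.List.pyRange a b) (fun x => x)
      = PySem.List.pyRange a (b+2) := by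
  apply PySem.List.sorted_eq_of_perm_of_pairwise_lt
  · have e1 : PySem.List.pyRange a (b+2) = PySem.List.pyRange a (b+1) ++ [b+1] := by
      rw [show b+2 = (b+1)+1 by ring]; exact PySem.List.pyRange_one_succ_right (by omega)
    have e2 : PySem.List.pyRange a (b+1) = PySem.List.pyRange a b ++ [b] :=
      PySem.List.pyRange_one_succ_right hab
    rw [e1, e2, List.append_assoc]
    calc (PySem.List.pyRange a b ++ ([b] ++ [b+1])).Perm
          (([b] ++ [b+1]) ++ PySem.List.pyRange a b) := List.perm_append_comm
      _ = [b, b+1] ++ PySem.List.pyRange a b := rfl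
  · simpa using PySem.List.pairwise_lt_pyRange_one (a := a) (b := b+2)

-- set(range(L)) - set(range(a)) - set(range(L, L+a)) = range(a, L) (as the Set's ordered list)
lemma pvDiff_eq (L a M : Int) (h0 : 0 ≤ a) (hL : a ≤ L) (hM : M = L + a) :
    PySem.Set.diff (PySem.Set.diff (PySem.Set.ofList (PySem.List.pyRange 0 L))
        (PySem.Set.ofList (PySem.List.pyRange 0 a)))
        (PySem.Set.ofList (PySem.List.pyRange L M))
      = PySem.List.pyRange a L := by
  subst hM
  rw [PySem.Set.ofList_eq_self_of_nodup _ (PySem.List.nodup_pyRange_one 0 L),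
      PySem.Set.ofList_eq_self_of_nodup _ (PySem.List.nodup_pyRange_one 0 a),
      PySem.Set.ofList_eq_self_of_nodup _ (PySem.List.nodup_pyRange_one L (L+a))]
  have hdiff : ∀ (s t : List Int),
      PySem.Set.diff s t = s.filter (fun x => !PySem.Set.contains t x) := fun _ _ => rfl
  rw [hdiff, hdiff]
  have step1 : (PySem.List.pyRange 0 L).filter
      (fun x => !PySem.Set.contains (PySem.List.pyRange 0 a) x) = PySem.List.pyRange a L := by
    rw [PySem.List.pyRange_one_append 0 a L h0 hL, List.filter_append]
    have e1 : (PySem.List.pyRange 0 a).filter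
        (fun x => !PySem.Set.contains (PySem.List.pyRange 0 a) x) = [] := by
      apply List.filter_eq_nil_iff.mpr
      intro x hx
      have hm := PySem.List.mem_pyRange_one.mp hx
      simp [PySem.Set.contains_eq_listContains, PySem.List.mem_pyRange_one]
      omega
    have e2 : (PySem.List.pyRange a L).filter
        (fun x => !PySem.Set.contains (PySem.List.pyRange 0 a) x) = PySem.List.pyRange a L := by
      apply List.filter_eq_self.mpr
      intro x hx
      have hm := PySem.List.mem_pyRange_one.mp hx
      simp [PySem.Set.contains_eq_listContains, PySem.List.mem_pyRange_one]
      omega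
    rw [e1, e2, List.nil_append]
  rw [step1]
  apply List.filter_eq_self.mpr
  intro x hx
  have hm := PySem.List.mem_pyRange_one.mp hx
  simp [PySem.Set.contains_eq_listContains, PySem.List.mem_pyRange_one]
  omega

lemma pvListSetRange_eq (a b : Int) :
    pvListSetRange a b = pvSetToList (PySem.List.pyRange a b) := by
  rw [pvListSetRange, PySem.Set.ofList_eq_self_of_nodup _ (PySem.List.nodup_pyRange_one a b)]

lemma pvGetD_MkA (n j i : Int) (h0 : 0 ≤ i) (hi : i < n) :
    (pvMkA n j).getD i []
      = if i < j then PySem.List.pyRange 0 (2*i+2) else [2*i, 2*i+1] := by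
  rw [pvMkA]; exact pvGetD_mk n _ h0 hi []

lemma pvGetD_MkC (L n j i : Int) (h0 : 0 ≤ i) (hi : i < n) :
    (pvMkC L n j).getD i []
      = if i < j then PySem.List.pyRange L (L+2*i+2) else [2*i+L, 2*i+1+L] := by
  rw [pvMkC]; exact pvGetD_mk n _ h0 hi []

lemma pvA_step (n j : Int) (h0 : 0 < j) (hj : j < n) :
    ((pvMkA n j).insert j ((pvMkA n j).getD j [] ++ (pvMkA n j).getD (j-1) [])).insert j
      (PySem.List.sorted (((pvMkA n j).insert j
        ((pvMkA n j).getD j [] ++ (pvMkA n j).getD (j-1) [])).getD j []) (fun x => x))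
    = pvMkA n (j+1) := by
  have hg1 : (pvMkA n j).getD j [] = [2*j, 2*j+1] := by
    rw [pvGetD_MkA n j j (by omega) hj, if_neg (lt_irrefl j)]
  have hg2 : (pvMkA n j).getD (j-1) [] = PySem.List.pyRange 0 (2*j) := by
    rw [pvGetD_MkA n j (j-1) (by omega) (by omega), if_pos (by omega),
        show 2*(j-1)+2 = 2*j by ring]
  rw [hg1, hg2, pvMkA,
      pvInsert_mk n _ (by omega) hj ([2*j, 2*j+1] ++ PySem.List.pyRange 0 (2*j))]
  rw [pvGetD_mk n _ (by omega) hj []]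
  rw [if_pos (rfl : j = j), pvSorted_step 0 (2*j) (by omega)]
  rw [pvInsert_mk n _ (by omega) hj (PySem.List.pyRange 0 (2*j+2))]
  congr 1
  apply List.map_congr_left
  intro i hi
  rw [PySem.List.mem_pyRange_one] at hi
  by_cases hij : i = j
  · subst hij; simp [show i < i + 1 by omega]
  · have h1 : (i < j) = (i < j + 1) := by
      apply propext; constructor <;> intro <;> omega
    simp only [if_neg hij, h1]

lemma pvC_step (L n j : Int) (h0 : 0 < j) (hj : j < n) :
    ((pvMkC L n j).insert j ((pvMkC L n j).getD j [] ++ (pvMkC L n j).getD (j-1) [])).insert j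
      (PySem.List.sorted (((pvMkC L n j).insert j
        ((pvMkC L n j).getD j [] ++ (pvMkC L n j).getD (j-1) [])).getD j []) (fun x => x))
    = pvMkC L n (j+1) := by
  have hg1 : (pvMkC L n j).getD j [] = [2*j+L, (2*j+L)+1] := by
    rw [pvGetD_MkC L n j j (by omega) hj, if_neg (lt_irrefl j),
        show 2*j+1+L = (2*j+L)+1 by ring]
  have hg2 : (pvMkC L n j).getD (j-1) [] = PySem.List.pyRange L (2*j+L) := by
    rw [pvGetD_MkC L n j (j-1) (by omega) (by omega), if_pos (by omega),
        show L+2*(j-1)+2 = 2*j+L by ring]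
  rw [hg1, hg2, pvMkC,
      pvInsert_mk n _ (by omega) hj ([2*j+L, (2*j+L)+1] ++ PySem.List.pyRange L (2*j+L))]
  rw [pvGetD_mk n _ (by omega) hj []]
  rw [if_pos (rfl : j = j), pvSorted_step L (2*j+L) (by omega),
      show (2*j+L)+2 = L+2*j+2 by ring]
  rw [pvInsert_mk n _ (by omega) hj (PySem.List.pyRange L (L+2*j+2))]
  congr 1
  apply List.map_congr_left
  intro i hi
  rw [PySem.List.mem_pyRange_one] at hi
  by_cases hij : i = j
  · subst hij; simp [show i < i + 1 by omega]
  · have h1 : (i < j) = (i < j + 1) := by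
      apply propext; constructor <;> intro <;> omega
    simp only [if_neg hij, h1]

lemma pvB_step (L j : Int) (h0 : 0 ≤ j) (v : List Int)
    (hv : v = pvListSetRange (2*j+2) L) :
    (pvMkB L j).insert j v = pvMkB L (j+1) := by
  rw [pvMkB, pvInsert_fresh j h0 _ v, pvMkB]
  congr 1
  apply List.map_congr_left
  intro i hi
  rw [PySem.List.mem_pyRange_one] at hi
  by_cases hij : i = j
  · subst hij; simp [hv]
  · simp [hij]

lemma pvStep_eq (L n j : Int) (h0 : 0 ≤ j) (hj : j < n) (h2 : 2*n ≤ L) :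
    pvStepA L (pvMkA n j, pvMkB L j, pvMkC L n j) j
      = (pvMkA n (j+1), pvMkB L (j+1), pvMkC L n (j+1)) := by
  by_cases hj0 : j = 0
  · subst hj0
    simp only [pvStepA]
    rw [if_neg (by simp : ¬ ((0:Int) ≠ 0))]
    dsimp only
    have hga : (pvMkA n 0).getD 0 [] = PySem.List.pyRange 0 (2*0+2) := by
      rw [pvGetD_MkA n 0 0 (by omega) (by omega), if_neg (by omega : ¬ (0:Int) < 0)]
      decide
    have hgc : (pvMkC L n 0).getD 0 [] = PySem.List.pyRange L (L+(2*0+2)) := by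
      rw [pvGetD_MkC L n 0 0 (by omega) (by omega), if_neg (by omega : ¬ (0:Int) < 0)]
      rw [show 2*(0:Int)+L = L by ring, show 2*(0:Int)+1+L = L+1 by ring,
          show L+(2*(0:Int)+2) = L+2 by ring]
      rw [PySem.List.pyRange_one_cons (by omega), PySem.List.pyRange_one_cons (by omega),
          PySem.List.pyRange_one_eq_nil (by omega)]
    rw [hga, hgc, pvDiff_eq L (2*0+2) (L+(2*0+2)) (by omega) (by omega) rfl,
        ← pvListSetRange_eq, pvB_step L 0 (by omega) _ rfl]
    have hA : pvMkA n 0 = pvMkA n (0+1) := by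
      rw [pvMkA, pvMkA]
      congr 1
      apply List.map_congr_left
      intro i hi
      rw [PySem.List.mem_pyRange_one] at hi
      by_cases hi0 : i = 0
      · subst hi0; decide
      · rw [if_neg (by omega : ¬ i < (0:Int)), if_neg (by omega : ¬ i < (0:Int) + 1)]
    have hC : pvMkC L n 0 = pvMkC L n (0+1) := by
      rw [pvMkC, pvMkC]
      congr 1
      apply List.map_congr_left
      intro i hi
      rw [PySem.List.mem_pyRange_one] at hi
      by_cases hi0 : i = 0
      · subst hi0
        rw [if_neg (by omega : ¬ (0:Int) < 0), if_pos (by omega : (0:Int) < 0 + 1)]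
        congr 1
        rw [show 2*(0:Int)+L = L by ring, show 2*(0:Int)+1+L = L+1 by ring,
            show L+2*(0:Int)+2 = L+2 by ring]
        rw [PySem.List.pyRange_one_cons (by omega), PySem.List.pyRange_one_cons (by omega),
            PySem.List.pyRange_one_eq_nil (by omega)]
      · rw [if_neg (by omega : ¬ i < (0:Int)), if_neg (by omega : ¬ i < (0:Int) + 1)]
    rw [← hA, ← hC]
  · simp only [pvStepA]
    rw [if_pos (show j ≠ 0 from hj0)]
    dsimp only
    rw [pvA_step n j (by omega) hj, pvC_step L n j (by omega) hj]
    rw [pvGetD_MkA n (j+1) j (by omega) (by omega), if_pos (by omega : j < j+1)]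
    rw [pvGetD_MkC L n (j+1) j (by omega) hj, if_pos (by omega : j < j+1)]
    rw [pvDiff_eq L (2*j+2) (L+2*j+2) (by omega) (by omega) (by ring),
        ← pvListSetRange_eq, pvB_step L j h0 _ rfl]

lemma pvFold_inv (L n : Int) (h2 : 2*n ≤ L) (j : Nat) (hj : (j : Int) ≤ n) :
    (PySem.List.pyRange 0 (j : Int)).foldl (pvStepA L) (pvMkA n 0, PySem.Dict.empty, pvMkC L n 0)
      = (pvMkA n j, pvMkB L j, pvMkC L n j) := by
  induction j with
  | zero =>
    simp only [Nat.cast_zero, PySem.List.pyRange_one_eq_nil (le_refl (0:Int)), List.foldl_nil]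
    have hB : pvMkB L 0 = PySem.Dict.empty := by
      rw [pvMkB, PySem.List.pyRange_one_eq_nil (le_refl (0:Int))]; rfl
    rw [hB]
  | succ k ih =>
    have hk : (k : Int) ≤ n := by push_cast at hj ⊢; omega
    rw [show ((k+1 : Nat) : Int) = (k : Int) + 1 by push_cast; ring,
        PySem.List.pyRange_one_succ_right (by positivity), List.foldl_append, ih hk,
        List.foldl_cons, List.foldl_nil]
    exact pvStep_eq L n k (by positivity) (by push_cast at hj; omega) h2

lemma pvTdiv_le (L : Int) (h : 0 < PySem.Int.truncdiv L 2) : 2 * PySem.Int.truncdiv L 2 ≤ L := by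
  have ht : PySem.Int.truncdiv L 2 = L.tdiv 2 := rfl
  rw [ht] at h ⊢
  by_cases h0 : 0 ≤ L
  · rw [Int.tdiv_eq_ediv_of_nonneg h0] at h ⊢; omega
  · exfalso
    have hle : L.tdiv 2 ≤ 0 := by
      have e : L = -(-L) := by ring
      have hnn : 0 ≤ (-L).tdiv 2 := by
        rw [Int.tdiv_eq_ediv_of_nonneg (by omega)]
        exact Int.ediv_nonneg (by omega) (by omega)
      rw [e, Int.neg_tdiv]
      omega
    omega

lemma pvMain (L : Int) : ABC_periodic L = ABC_periodic_alt L := by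
  simp only [ABC_periodic, ABC_periodic_alt]
  rw [PySem.List.foldl_prod_mk (f := fun (d : pvD) (i : Int) => d.insert i [2*i, 2*i+1])
        (g := fun (d : pvD) (i : Int) => d.insert i [2*i+L, 2*i+1+L])]
  dsimp only
  have hA0 : (PySem.List.pyRange 0 (PySem.Int.truncdiv L 2)).foldl
      (fun (d : pvD) i => d.insert i [2*i, 2*i+1]) PySem.Dict.empty
        = pvMkA (PySem.Int.truncdiv L 2) 0 := by
    apply PySem.Dict.ext
    rw [PySem.Dict.items_foldl_insert_fresh (PySem.List.pyRange 0 (PySem.Int.truncdiv L 2))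
          (fun i => i) (fun i => [2*i, 2*i+1]) PySem.Dict.empty
          (by intro a _; simp) (by simpa using PySem.List.nodup_pyRange_one 0 (PySem.Int.truncdiv L 2))]
    rw [pvMkA]
    show PySem.Dict.empty.items ++ _ = _
    rw [show PySem.Dict.empty.items = ([] : List (Int × List Int)) from rfl, List.nil_append]
    apply List.map_congr_left
    intro i hi
    rw [PySem.List.mem_pyRange_one] at hi
    rw [if_neg (by omega)]
  have hC0 : (PySem.List.pyRange 0 (PySem.Int.truncdiv L 2)).foldl
      (fun (d : pvD) i => d.insert i [2*i+L, 2*i+1+L]) PySem.Dict.empty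
        = pvMkC L (PySem.Int.truncdiv L 2) 0 := by
    apply PySem.Dict.ext
    rw [PySem.Dict.items_foldl_insert_fresh (PySem.List.pyRange 0 (PySem.Int.truncdiv L 2))
          (fun i => i) (fun i => [2*i+L, 2*i+1+L]) PySem.Dict.empty
          (by intro a _; simp) (by simpa using PySem.List.nodup_pyRange_one 0 (PySem.Int.truncdiv L 2))]
    rw [pvMkC]
    show PySem.Dict.empty.items ++ _ = _
    rw [show PySem.Dict.empty.items = ([] : List (Int × List Int)) from rfl, List.nil_append]
    apply List.map_congr_left
    intro i hi
    rw [PySem.List.mem_pyRange_one] at hi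
    rw [if_neg (by omega)]
  rw [hA0, hC0]
  have hkeys : (pvMkA (PySem.Int.truncdiv L 2) 0).keys
      = PySem.List.pyRange 0 (PySem.Int.truncdiv L 2) := by
    rw [pvMkA]; exact pvKeys_mk_map (PySem.Int.truncdiv L 2) _
  rw [hkeys]
  by_cases hpos : 0 < PySem.Int.truncdiv L 2
  · have h2 : 2 * PySem.Int.truncdiv L 2 ≤ L := pvTdiv_le L hpos
    have hN : (((PySem.Int.truncdiv L 2).toNat : Nat) : Int) = PySem.Int.truncdiv L 2 :=
      Int.toNat_of_nonneg (by omega)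
    have hfold := pvFold_inv L (PySem.Int.truncdiv L 2) h2 (PySem.Int.truncdiv L 2).toNat
      (le_of_eq hN)
    rw [hN] at hfold
    rw [hfold]
    dsimp only
    refine Prod.ext ?_ (Prod.ext ?_ ?_)
    · rw [pvMkA]
      apply List.map_congr_left
      intro i hi
      rw [PySem.List.mem_pyRange_one] at hi
      rw [if_pos (by omega)]
    · rw [pvMkB]
    · rw [pvMkC]
      apply List.map_congr_left
      intro i hi
      rw [PySem.List.mem_pyRange_one] at hi
      rw [if_pos (by omega)]
  · rw [PySem.List.pyRange_one_eq_nil (by omega)]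
    simp only [List.foldl_nil, List.map_nil]
    rw [pvMkA, pvMkC, PySem.List.pyRange_one_eq_nil (by omega : PySem.Int.truncdiv L 2 ≤ 0)]
    rfl

-- ===== VERDICT (by name: the statement is the Claim_ definition above) =====
theorem ABC_periodic_spec : Claim_equal_ABC_periodic := by
  intro L _
  exact pvMain L
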